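-- pv_equiv track=rewrite | github.com/Capstone-Project-JYSF/Allard | Web_Interface/backend_functions.py | convert_checkbox
-- ===== SOURCE A (Python) =====
-- def convert_checkbox(selected):
--     """
--     Convert user's selected choices into standard convention
--     Easier for model to process.
--     Return: list
--     """
--     checkboxes = ["L1", "L2", "L3", "L4", "L8", "L9", "N5", "N6", "N8", "T1", "T2", "T3","T5","T6"]
--     result = []
--     for i in checkboxes:
--         if i in selected:
--             result.append(1)
--         else:
--             result.append(0)
--     return result
-- ===== SOURCE B (Python) =====
-- def convert_checkbox(selected):
--     """
--     Convert user's selected choices into standard convention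
--     Easier for model to process.
--     Return: list
--     """
--     checkboxes = ["L1", "L2", "L3", "L4", "L8", "L9", "N5", "N6", "N8", "T1", "T2", "T3", "T5", "T6"]
--     index = {name: i for i, name in enumerate(checkboxes)}
--     result = [0] * len(checkboxes)
--     for item in selected:
--         pos = index.get(item)
--         if pos is not None:
--             result[pos] = 1
--     return result
-- ===== Notes on version B (the rewrite author's own statement) =====
-- stated objective: faster
-- what changed: B builds a name-to-position dict once and makes a single pass over the input, setting bits in a preallocated [0]*14, instead of scanning the whole input list once per fixed checkbox name.
import Mathlib
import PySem

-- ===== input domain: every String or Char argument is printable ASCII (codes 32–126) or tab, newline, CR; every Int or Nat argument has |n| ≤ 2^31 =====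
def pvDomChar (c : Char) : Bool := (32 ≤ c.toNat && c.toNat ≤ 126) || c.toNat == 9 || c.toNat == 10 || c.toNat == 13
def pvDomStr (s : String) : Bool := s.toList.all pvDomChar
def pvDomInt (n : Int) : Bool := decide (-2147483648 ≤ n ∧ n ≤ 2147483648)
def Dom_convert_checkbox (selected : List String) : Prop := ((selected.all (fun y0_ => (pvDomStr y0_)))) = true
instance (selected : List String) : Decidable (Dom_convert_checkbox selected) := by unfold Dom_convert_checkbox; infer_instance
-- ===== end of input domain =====

-- B replaces A's per-checkbox scans of `selected` by one dict-indexed pass over `selected`; objective: faster (single pass, constant-factor).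

-- ===== PORT A =====
-- the fixed checkbox list (the `checkboxes` local of both Pythons)
def pvCbs : List String := ["L1", "L2", "L3", "L4", "L8", "L9", "N5", "N6", "N8", "T1", "T2", "T3", "T5", "T6"]

def convert_checkbox (selected : List String) : List Int :=
  pvCbs.foldl (fun result i => if selected.contains i then result ++ [1] else result ++ [0]) []

-- ===== PORT B =====
-- index = {name: i for i, name in enumerate(checkboxes)}
def pvIndex : PySem.Dict String Int :=
  PySem.Dict.ofList ((PySem.List.enumerate pvCbs).map (fun p => (p.2, p.1)))

-- loop body: pos = index.get(item); if pos is not None: result[pos] = 1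
def pvStep (result : List Int) (item : String) : List Int :=
  match pvIndex.get? item with
  | some pos => PySem.List.pySetD result pos 1
  | none => result

def convert_checkbox_alt (selected : List String) : List Int :=
  selected.foldl pvStep (List.replicate pvCbs.length 0)

-- ===== PRECONDITION & SPEC =====
def Spec_convert_checkbox (selected : List String) (out : List Int) : Prop := out = convert_checkbox_alt selected
instance (selected : List String) (out : List Int) : Decidable (Spec_convert_checkbox selected out) := by unfold Spec_convert_checkbox; infer_instance

-- ===== CLAIM (what is proved, stated in full; the proofs are below) =====
def Claim_equal_convert_checkbox : Prop := ∀ (selected : List String), Dom_convert_checkbox selected → Spec_convert_checkbox selected (convert_checkbox selected)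

-- ===== LEMMAS AND PROOFS =====

-- A in map form
theorem pvA_eq_map (selected : List String) :
    convert_checkbox selected = pvCbs.map (fun i => if selected.contains i then (1 : Int) else 0) := by
  have h : (fun (result : List Int) (i : String) =>
      if selected.contains i then result ++ [1] else result ++ [0])
      = fun result i => result ++ [if selected.contains i then (1 : Int) else 0] := by
    funext r i; split <;> rfl
  rw [convert_checkbox, h, PySem.List.foldl_append_singleton_eq_map]
  rfl

-- lookups in the concrete index dict
theorem pvLookup_hit : ∀ j : Fin 14, pvIndex.get? (pvCbs.getD j "") = some (j : Int) := by decide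

theorem pvCbs_inj : ∀ j k : Fin 14, pvCbs.getD j "" = pvCbs.getD k "" → j = k := by decide

theorem pvLookup_some (s : String) (pos : Int) (h : pvIndex.get? s = some pos) :
    ∃ j : Fin 14, pos = (j : Int) ∧ pvCbs.getD j "" = s := by
  have hm := PySem.Dict.mem_items_of_get?_eq_some pvIndex h
  have hitems : pvIndex.items = [("L1", (0 : Int)), ("L2", 1), ("L3", 2), ("L4", 3),
      ("L8", 4), ("L9", 5), ("N5", 6), ("N6", 7), ("N8", 8), ("T1", 9), ("T2", 10),
      ("T3", 11), ("T5", 12), ("T6", 13)] := by decide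
  rw [hitems] at hm
  fin_cases hm <;> decide

theorem pvLookup_none (s : String) (h : pvIndex.get? s = none) (j : Fin 14) :
    pvCbs.getD j "" ≠ s := by
  intro he
  have hj := pvLookup_hit j
  rw [he, h] at hj
  simp at hj

theorem pvStep_length (acc : List Int) (s : String) : (pvStep acc s).length = acc.length := by
  unfold pvStep
  cases h : pvIndex.get? s with
  | none => rfl
  | some pos => simp [PySem.List.length_pySetD]

theorem pvFold_length (sel : List String) (acc : List Int) :
    (sel.foldl pvStep acc).length = acc.length := by
  induction sel generalizing acc with
  | nil => rfl
  | cons s rest ih => simp [List.foldl_cons, ih, pvStep_length]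

theorem pvFold_getD (sel : List String) (acc : List Int) (hlen : acc.length = 14)
    (j : Fin 14) :
    (sel.foldl pvStep acc).getD j 0
      = if sel.contains (pvCbs.getD j "") then 1 else acc.getD j 0 := by
  induction sel generalizing acc with
  | nil => simp
  | cons s rest ih =>
    rw [List.foldl_cons, ih (pvStep acc s) (by rw [pvStep_length, hlen])]
    cases h : pvIndex.get? s with
    | none =>
      have hstep : pvStep acc s = acc := by unfold pvStep; rw [h]
      have hne : pvCbs.getD j "" ≠ s := pvLookup_none s h j
      rw [hstep, List.contains_cons]
      have : ((pvCbs.getD (↑j) "") == s) = false := by simpa using hne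
      rw [this, Bool.false_or]
    | some pos =>
      obtain ⟨k, hk, hks⟩ := pvLookup_some s pos h
      subst hk
      have hstep : pvStep acc s = acc.set (k : Nat) 1 := by
        unfold pvStep; rw [h]
        show PySem.List.pySetD acc ((k : Nat) : Int) 1 = acc.set (k : Nat) 1
        rw [PySem.List.pySetD_of_nonneg acc 1 (Int.natCast_nonneg _)]
        simp
      rw [hstep, List.contains_cons]
      by_cases hjk : j = k
      · subst hjk
        have h1 : (acc.set (↑j : Nat) 1).getD (↑j) 0 = 1 := by
          rw [List.getD_eq_getElem?_getD, List.getElem?_set]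
          simp [show (↑j : Nat) < acc.length by omega]
        rw [h1, hks]
        simp
      · have hne : pvCbs.getD (↑j) "" ≠ s := by
          rw [← hks]; intro he; exact hjk (pvCbs_inj j k he)
        have h1 : (acc.set (↑k : Nat) 1).getD (↑j) 0 = acc.getD (↑j) 0 := by
          rw [List.getD_eq_getElem?_getD, List.getElem?_set]
          have : ¬((↑k : Nat) = (↑j : Nat)) := fun he => hjk (Fin.ext he.symm)
          simp [this, List.getD_eq_getElem?_getD]
        rw [h1]
        have : ((pvCbs.getD (↑j) "") == s) = false := by simpa using hne
        rw [this, Bool.false_or]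

-- ===== VERDICT (by name: the statement is the Claim_ definition above) =====
theorem convert_checkbox_spec : Claim_equal_convert_checkbox := by
  intro selected _
  unfold Spec_convert_checkbox
  rw [pvA_eq_map]
  have hlenB : (convert_checkbox_alt selected).length = 14 := by
    unfold convert_checkbox_alt
    rw [pvFold_length]
    rfl
  apply List.ext_getElem
  · simp [hlenB, pvCbs]
  · intro j h1 h2
    have hj : j < 14 := by simpa [pvCbs] using h1
    have hB := pvFold_getD selected (List.replicate pvCbs.length 0) rfl ⟨j, hj⟩
    have hinit : (List.replicate pvCbs.length (0 : Int)).getD j 0 = 0 :=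
      List.getD_replicate 0 (by simpa [pvCbs] using hj)
    rw [hinit] at hB
    have h2' : j < (List.foldl pvStep (List.replicate pvCbs.length 0) selected).length := by
      rw [pvFold_length]; simpa [pvCbs] using hj
    have hcb : pvCbs.getD j "" = pvCbs[j]'(by simpa [pvCbs] using hj) := by
      rw [List.getD_eq_getElem _ _ (by simpa [pvCbs] using hj)]
    rw [hcb] at hB
    show _ = (List.foldl pvStep (List.replicate pvCbs.length 0) selected)[j]'h2'
    rw [← List.getD_eq_getElem _ 0 h2', hB, List.getElem_map]
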